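-- pv_equiv track=rewrite | github.com/stefansaru/stuff | 2017/02/22/2017-02-22-hash-code/main.py | apply_single_permutation_square
-- ===== SOURCE A (Python) =====
-- def apply_single_permutation_square(slice_head_position, slice_slicing_variant_data, occupied, content, L):
--   # head position must be vacant (not occupied == True)
--   r = slice_head_position[0]
--   c = slice_head_position[1]
--
--   if occupied[r][c] == True:
--     can_be_done = False
--     return can_be_done, occupied,0
--
--   # look for all of the slice's squares, and make sure they are vacant (not occupied == True)
--   num_rows = slice_slicing_variant_data[0]
--   num_cols = slice_slicing_variant_data[1]
--   num_M = 0
--   num_T = 0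
--   slice_squares = []
--
--   ri = r
--   for i in range (num_rows):
--     ci = c
--     for j in range (num_cols):
--       if occupied[ri][ci] == True:
--         can_be_done = False
--         return can_be_done, occupied,0
--       if content[ri][ci] == 'M':
--         num_M+=1
--       elif content[ri][ci] == 'T':
--         num_T+=1
--       slice_squares.append((ri,ci))
--       ci+=1
--     ri+=1
--
--   # it can be done, since all required squares are vacant
--   # now check if there are enough toppings
--   if num_M < L or num_T < L:
--     can_be_done = False
--     score = 0
--     return can_be_done, occupied, score
--
--   # the squares are vacant and there are enough toppings
--   # now mark the slice, by occupying its squares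
--   for square in slice_squares:
--     ri = square[0]
--     ci = square[1]
--     occupied[ri][ci] = True
--
--   can_be_done = True
--   score = num_rows * num_cols
--   return can_be_done, occupied, score
-- ===== SOURCE B (Python) =====
-- def apply_single_permutation_square(slice_head_position, slice_slicing_variant_data, occupied, content, L):
--     # Three separate passes over the block (vacancy, topping counts, marking)
--     # instead of A's single combined scan that builds a square list.
--     # Mutates `occupied` in place on success, like A.
--     r, c = slice_head_position
--     num_rows, num_cols = slice_slicing_variant_data
--
--     if occupied[r][c]:
--         return False, occupied, 0
--
--     # pass 1: every cell of the block must be vacant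
--     for i in range(num_rows):
--         for j in range(num_cols):
--             if occupied[r + i][c + j]:
--                 return False, occupied, 0
--
--     # pass 2: count toppings over the block
--     num_M = sum(content[r + i][c + j] == 'M' for i in range(num_rows) for j in range(num_cols))
--     num_T = sum(content[r + i][c + j] == 'T' for i in range(num_rows) for j in range(num_cols))
--     if num_M < L or num_T < L:
--         return False, occupied, 0
--
--     # pass 3: occupy the block
--     for i in range(num_rows):
--         for j in range(num_cols):
--             occupied[r + i][c + j] = True
--     return True, occupied, num_rows * num_cols
-- ===== Notes on version B (the rewrite author's own statement) =====
-- stated objective: simpler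
-- what changed: A's single combined nested scan that interleaves vacancy checking, topping counting and building a slice_squares list (later replayed to mark cells) is replaced by three independent simple passes over the block: a vacancy pass, a counting pass, and a marking pass that recomputes the cell indices instead of storing them.
import Mathlib
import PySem

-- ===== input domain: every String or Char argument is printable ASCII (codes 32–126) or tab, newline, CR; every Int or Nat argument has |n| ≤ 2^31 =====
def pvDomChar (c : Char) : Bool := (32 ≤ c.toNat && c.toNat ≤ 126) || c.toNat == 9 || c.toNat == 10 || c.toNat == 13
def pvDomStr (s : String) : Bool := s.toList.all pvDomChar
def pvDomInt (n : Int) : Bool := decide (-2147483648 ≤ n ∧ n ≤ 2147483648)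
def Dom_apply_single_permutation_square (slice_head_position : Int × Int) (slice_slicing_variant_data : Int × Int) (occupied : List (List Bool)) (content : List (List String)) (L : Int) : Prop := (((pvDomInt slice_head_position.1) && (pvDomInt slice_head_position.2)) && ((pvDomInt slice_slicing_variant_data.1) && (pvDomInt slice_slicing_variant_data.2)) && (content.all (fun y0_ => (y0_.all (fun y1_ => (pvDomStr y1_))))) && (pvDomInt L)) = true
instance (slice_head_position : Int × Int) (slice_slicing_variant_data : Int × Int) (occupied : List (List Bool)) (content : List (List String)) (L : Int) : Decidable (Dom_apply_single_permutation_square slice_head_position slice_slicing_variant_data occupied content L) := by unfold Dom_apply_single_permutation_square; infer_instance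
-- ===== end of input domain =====

-- B reorganises A's single combined scan (vacancy + counting + slice_squares list) into three
-- independent passes over the same block (objective: simpler).  Both Pythons mutate `occupied`
-- in place on the same cells on success; the theorems are about the returned value.

-- shared 2-D accessors: g[i][j] with Python's negative-index rule; the .getD defaults are
-- reached only where Python raises IndexError, which Pre_ excludes.
def getB (g : List (List Bool)) (i j : Int) : Bool :=
  (PySem.List.pyGet? ((PySem.List.pyGet? g i).getD []) j).getD false
def getS (g : List (List String)) (i j : Int) : String :=
  (PySem.List.pyGet? ((PySem.List.pyGet? g i).getD []) j).getD ""
-- g[i][j] = true (Python's in-place row update, functionally)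
def setB (g : List (List Bool)) (i j : Int) : List (List Bool) :=
  PySem.List.pySetD g i (PySem.List.pySetD (PySem.List.pyGetD g i []) j true)

-- ===== PORT A =====
-- inner `for j in range(num_cols)` loop: early return = none; state (num_M, num_T, slice_squares)
def aInner (occ : List (List Bool)) (ct : List (List String)) (ri : Int) :
    Int → Nat → Int × Int × List (Int × Int) → Option (Int × Int × List (Int × Int))
  | _, 0, st => some st
  | ci, k+1, (m, t, sq) =>
    if getB occ ri ci then none
    else if getS ct ri ci = "M" then
      aInner occ ct ri (ci + 1) k (m + 1, t, sq ++ [(ri, ci)])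
    else if getS ct ri ci = "T" then
      aInner occ ct ri (ci + 1) k (m, t + 1, sq ++ [(ri, ci)])
    else
      aInner occ ct ri (ci + 1) k (m, t, sq ++ [(ri, ci)])

-- outer `for i in range(num_rows)` loop
def aOuter (occ : List (List Bool)) (ct : List (List String)) (c : Int) (nc : Nat) :
    Int → Nat → Int × Int × List (Int × Int) → Option (Int × Int × List (Int × Int))
  | _, 0, st => some st
  | ri, k+1, st =>
    match aInner occ ct ri c nc st with
    | none => none
    | some st' => aOuter occ ct c nc (ri + 1) k st'

def apply_single_permutation_square (slice_head_position : Int × Int) (slice_slicing_variant_data : Int × Int) (occupied : List (List Bool)) (content : List (List String)) (L : Int) : Bool × List (List Bool) × Int :=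
  let r := slice_head_position.1
  let c := slice_head_position.2
  if getB occupied r c then (false, occupied, 0)
  else
    let num_rows := slice_slicing_variant_data.1
    let num_cols := slice_slicing_variant_data.2
    match aOuter occupied content c num_cols.toNat r num_rows.toNat (0, 0, []) with
    | none => (false, occupied, 0)
    | some (num_M, num_T, slice_squares) =>
      if num_M < L || num_T < L then (false, occupied, 0)
      else (true, slice_squares.foldl (fun g p => setB g p.1 p.2) occupied,
            num_rows * num_cols)

-- ===== PORT B =====
-- pass 1: vacancy of one row segment / of the whole block
def bRowVac (occ : List (List Bool)) (ri : Int) : Int → Nat → Bool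
  | _, 0 => true
  | ci, k+1 => !getB occ ri ci && bRowVac occ ri (ci + 1) k
def bVac (occ : List (List Bool)) (c : Int) (nc : Nat) : Int → Nat → Bool
  | _, 0 => true
  | ri, k+1 => bRowVac occ ri c nc && bVac occ c nc (ri + 1) k
-- pass 2: count cells equal to `tgt` in one row segment / the whole block
def bRowCnt (ct : List (List String)) (tgt : String) (ri : Int) : Int → Nat → Int
  | _, 0 => 0
  | ci, k+1 => (if getS ct ri ci = tgt then 1 else 0) + bRowCnt ct tgt ri (ci + 1) k
def bCnt (ct : List (List String)) (tgt : String) (c : Int) (nc : Nat) : Int → Nat → Int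
  | _, 0 => 0
  | ri, k+1 => bRowCnt ct tgt ri c nc + bCnt ct tgt c nc (ri + 1) k
-- pass 3: mark one row segment / the whole block occupied
def bMarkRow (ri : Int) : List (List Bool) → Int → Nat → List (List Bool)
  | g, _, 0 => g
  | g, ci, k+1 => bMarkRow ri (setB g ri ci) (ci + 1) k
def bMark (c : Int) (nc : Nat) : List (List Bool) → Int → Nat → List (List Bool)
  | g, _, 0 => g
  | g, ri, k+1 => bMark c nc (bMarkRow ri g c nc) (ri + 1) k

def apply_single_permutation_square_alt (slice_head_position : Int × Int) (slice_slicing_variant_data : Int × Int) (occupied : List (List Bool)) (content : List (List String)) (L : Int) : Bool × List (List Bool) × Int :=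
  let r := slice_head_position.1
  let c := slice_head_position.2
  let nr := slice_slicing_variant_data.1.toNat
  let nc := slice_slicing_variant_data.2.toNat
  if getB occupied r c then (false, occupied, 0)
  else if !bVac occupied c nc r nr then (false, occupied, 0)
  else if bCnt content "M" c nc r nr < L || bCnt content "T" c nc r nr < L then
    (false, occupied, 0)
  else (true, bMark c nc occupied r nr,
        slice_slicing_variant_data.1 * slice_slicing_variant_data.2)

-- ===== PRECONDITION & SPEC =====
def cellOk {α : Type} (g : List (List α)) (i j : Int) : Bool :=
  ((PySem.List.pyGet? g i).bind (fun row => PySem.List.pyGet? row j)).isSome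

-- Pre_ excludes exactly the inputs on which the Python A raises IndexError: an out-of-range head
-- cell, or a block cell that the row-major scan actually reaches (all earlier block cells are
-- vacant) and that is out of range in `occupied`, or is vacant but out of range in `content`.
def Pre_apply_single_permutation_square (slice_head_position : Int × Int) (slice_slicing_variant_data : Int × Int) (occupied : List (List Bool)) (content : List (List String)) (L : Int) : Prop :=
  cellOk occupied slice_head_position.1 slice_head_position.2 = true ∧
  (getB occupied slice_head_position.1 slice_head_position.2 = true ∨
    ∀ i ∈ List.range slice_slicing_variant_data.1.toNat,
      ∀ j ∈ List.range slice_slicing_variant_data.2.toNat,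
        (∀ i' ∈ List.range slice_slicing_variant_data.1.toNat,
          ∀ j' ∈ List.range slice_slicing_variant_data.2.toNat,
            (i' < i ∨ (i' = i ∧ j' < j)) →
            getB occupied (slice_head_position.1 + (i' : Int)) (slice_head_position.2 + (j' : Int)) = false) →
        cellOk occupied (slice_head_position.1 + (i : Int)) (slice_head_position.2 + (j : Int)) = true ∧
        (getB occupied (slice_head_position.1 + (i : Int)) (slice_head_position.2 + (j : Int)) = false →
          cellOk content (slice_head_position.1 + (i : Int)) (slice_head_position.2 + (j : Int)) = true))
instance (slice_head_position : Int × Int) (slice_slicing_variant_data : Int × Int) (occupied : List (List Bool)) (content : List (List String)) (L : Int) : Decidable (Pre_apply_single_permutation_square slice_head_position slice_slicing_variant_data occupied content L) := by unfold Pre_apply_single_permutation_square; infer_instance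

def pvWitness_apply_single_permutation_square : (Int × Int) × (Int × Int) × List (List Bool) × List (List String) × Int :=
  ((0, 0), (1, 2), [[false, false]], [["M", "T"]], 1)

def Spec_apply_single_permutation_square (slice_head_position : Int × Int) (slice_slicing_variant_data : Int × Int) (occupied : List (List Bool)) (content : List (List String)) (L : Int) (out : Bool × List (List Bool) × Int) : Prop := out = apply_single_permutation_square_alt slice_head_position slice_slicing_variant_data occupied content L
instance (slice_head_position : Int × Int) (slice_slicing_variant_data : Int × Int) (occupied : List (List Bool)) (content : List (List String)) (L : Int) (out : Bool × List (List Bool) × Int) : Decidable (Spec_apply_single_permutation_square slice_head_position slice_slicing_variant_data occupied content L out) := by unfold Spec_apply_single_permutation_square; infer_instance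

-- ===== CLAIM (what is proved, stated in full; the proofs are below) =====
def Claim_equal_apply_single_permutation_square : Prop := ∀ (slice_head_position : Int × Int) (slice_slicing_variant_data : Int × Int) (occupied : List (List Bool)) (content : List (List String)) (L : Int), Dom_apply_single_permutation_square slice_head_position slice_slicing_variant_data occupied content L → Pre_apply_single_permutation_square slice_head_position slice_slicing_variant_data occupied content L → Spec_apply_single_permutation_square slice_head_position slice_slicing_variant_data occupied content L (apply_single_permutation_square slice_head_position slice_slicing_variant_data occupied content L)

-- ===== LEMMAS AND PROOFS =====

-- the cell list A's inner/outer loops append, in loop order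
def rowCells (ri : Int) : Int → Nat → List (Int × Int)
  | _, 0 => []
  | ci, k+1 => (ri, ci) :: rowCells ri (ci + 1) k
def blockCells (c : Int) (nc : Nat) : Int → Nat → List (Int × Int)
  | _, 0 => []
  | ri, k+1 => rowCells ri c nc ++ blockCells c nc (ri + 1) k

theorem aInner_eq (occ : List (List Bool)) (ct : List (List String)) (ri : Int) :
    ∀ (k : Nat) (ci m t : Int) (sq : List (Int × Int)),
    aInner occ ct ri ci k (m, t, sq) =
      if bRowVac occ ri ci k then
        some (m + bRowCnt ct "M" ri ci k, t + bRowCnt ct "T" ri ci k, sq ++ rowCells ri ci k)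
      else none := by
  intro k
  induction k with
  | zero => intro ci m t sq; simp [aInner, bRowVac, bRowCnt, rowCells]
  | succ k ih =>
    intro ci m t sq
    cases hgb : getB occ ri ci with
    | true => simp [aInner, bRowVac, hgb]
    | false =>
      by_cases hM : getS ct ri ci = "M" <;> by_cases hT : getS ct ri ci = "T"
      · exact absurd (hM ▸ hT) (by decide)
      all_goals
        rw [aInner]
        simp [hgb, hM, hT, ih, bRowVac, bRowCnt, rowCells, ← add_assoc]

theorem aOuter_eq (occ : List (List Bool)) (ct : List (List String)) (c : Int) (nc : Nat) :
    ∀ (k : Nat) (ri m t : Int) (sq : List (Int × Int)),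
    aOuter occ ct c nc ri k (m, t, sq) =
      if bVac occ c nc ri k then
        some (m + bCnt ct "M" c nc ri k, t + bCnt ct "T" c nc ri k, sq ++ blockCells c nc ri k)
      else none := by
  intro k
  induction k with
  | zero => intro ri m t sq; simp [aOuter, bVac, bCnt, blockCells]
  | succ k ih =>
    intro ri m t sq
    rw [aOuter, aInner_eq]
    cases hrv : bRowVac occ ri c nc with
    | false => simp [bVac, hrv]
    | true =>
      simp only [hrv, if_true, ih, bVac, bCnt, blockCells, Bool.true_and]
      split
      · exact congrArg some (Prod.ext (by ring) (Prod.ext (by ring) (by simp)))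
      · rfl

theorem rowCells_fold (ri : Int) :
    ∀ (k : Nat) (ci : Int) (g : List (List Bool)),
    (rowCells ri ci k).foldl (fun g p => setB g p.1 p.2) g = bMarkRow ri g ci k := by
  intro k
  induction k with
  | zero => intro ci g; rfl
  | succ k ih => intro ci g; simp only [rowCells, List.foldl_cons, bMarkRow]; exact ih _ _

theorem blockCells_fold (c : Int) (nc : Nat) :
    ∀ (k : Nat) (ri : Int) (g : List (List Bool)),
    (blockCells c nc ri k).foldl (fun g p => setB g p.1 p.2) g = bMark c nc g ri k := by
  intro k
  induction k with
  | zero => intro ri g; rfl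
  | succ k ih =>
    intro ri g
    simp only [blockCells, List.foldl_append, bMark, rowCells_fold]
    exact ih _ _

-- the unconditional core: the two ports are extensionally equal
theorem ports_eq (slice_head_position : Int × Int) (slice_slicing_variant_data : Int × Int) (occupied : List (List Bool)) (content : List (List String)) (L : Int) :
    apply_single_permutation_square slice_head_position slice_slicing_variant_data occupied content L =
    apply_single_permutation_square_alt slice_head_position slice_slicing_variant_data occupied content L := by
  unfold apply_single_permutation_square apply_single_permutation_square_alt
  cases hgb : getB occupied slice_head_position.1 slice_head_position.2 with
  | true => simp [hgb]
  | false =>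
    simp only [hgb, Bool.false_eq_true, if_false]
    rw [aOuter_eq]
    cases hv : bVac occupied slice_head_position.2 slice_slicing_variant_data.2.toNat
        slice_head_position.1 slice_slicing_variant_data.1.toNat with
    | false => simp [hv]
    | true =>
      simp only [hv, if_true, Bool.not_true, Bool.false_eq_true, if_false,
        zero_add, List.nil_append, blockCells_fold]

-- ===== VERDICT (by name: the statement is the Claim_ definition above) =====
theorem apply_single_permutation_square_spec : Claim_equal_apply_single_permutation_square := by
  intro hp dd occ ct L _ _
  unfold Spec_apply_single_permutation_square
  exact ports_eq hp dd occ ct L
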